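-- pv_equiv track=rewrite | github.com/Steven-ZhangJM/CS263_Final_Project | best_solution_gpt/p077.py | prime_sums
-- ===== SOURCE A (Python) =====
-- def prime_sums(limit):
--     primes = [2]
--     for i in range(3, limit, 2):
--         if all(i % p != 0 for p in primes):
--             primes.append(i)
--
--     ways = [0] * (limit + 1)
--     ways[0] = 1
--
--     for prime in primes:
--         for i in range(prime, limit + 1):
--             ways[i] += ways[i - prime]
--
--     for i in range(limit + 1):
--         if ways[i] > 5000:
--             return i
-- ===== SOURCE B (Python) =====
-- def prime_sums(limit):
--     def _odd_prime(n):
--         d = 3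
--         while d * d <= n:
--             if n % d == 0:
--                 return False
--             d += 2
--         return True
--
--     primes = [2] + [n for n in range(3, limit, 2) if _odd_prime(n)]
--
--     ways = [0] * (limit + 1)
--     ways[0] = 1
--
--     for p in primes:
--         for i in range(limit + 1 - p):
--             ways[i + p] += ways[i]
--
--     for i, w in enumerate(ways):
--         if w > 5000:
--             return i
--     return None
-- ===== Notes on version B (the rewrite author's own statement) =====
-- stated objective: alternative
-- what changed: prime generation tests each odd candidate independently by trial division by odd numbers up to its square root (no accumulated primes list is consulted), instead of A's division by every previously found prime; the DP iterates the shifted source-index range and the final scan uses enumerate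
import Mathlib
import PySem

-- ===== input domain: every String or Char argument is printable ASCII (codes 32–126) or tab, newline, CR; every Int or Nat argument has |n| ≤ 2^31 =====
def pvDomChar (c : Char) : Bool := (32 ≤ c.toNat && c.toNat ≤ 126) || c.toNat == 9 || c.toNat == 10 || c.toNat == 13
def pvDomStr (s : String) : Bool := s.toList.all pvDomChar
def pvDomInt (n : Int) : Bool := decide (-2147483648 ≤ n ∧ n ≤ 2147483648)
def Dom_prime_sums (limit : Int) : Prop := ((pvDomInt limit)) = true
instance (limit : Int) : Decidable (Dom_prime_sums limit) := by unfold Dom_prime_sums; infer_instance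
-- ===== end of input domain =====

-- B replaces A's trial division by all previously found primes with an independent
-- √n-bounded trial division per candidate (alternative decomposition; same DP results).

-- ===== PORT A =====
-- Port note: the ways buffer is kept as an Array so the port evaluates fast; reads/writes
-- ways[i] use getD/setIfInBounds (total forms) at index i.toNat — under Pre_ (0 ≤ limit)
-- every executed index is nonnegative and in range, so they are exact there.
def prime_sums (limit : Int) : Option Int :=
  let primes : List Int :=
    (PySem.List.pyRange 3 limit 2).foldl
      (fun primes i =>
        if primes.all (fun p => PySem.Int.mod i p != 0) then primes ++ [i] else primes)
      [2]
  let ways : Array Int := Array.replicate (limit + 1).toNat 0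
  let ways : Array Int := ways.setIfInBounds 0 1
  let ways : Array Int := primes.foldl
    (fun ways prime =>
      (PySem.List.pyRange prime (limit + 1) 1).foldl
        (fun (ways : Array Int) i =>
          ways.setIfInBounds i.toNat
            (ways.getD i.toNat 0 + ways.getD (i - prime).toNat 0))
        ways)
    ways
  (PySem.List.pyRange 0 (limit + 1) 1).find?
    (fun i => ways.getD i.toNat 0 > 5000)

-- ===== PORT B =====
-- while d * d <= n: … d += 2  (inner helper `_odd_prime` of Source B)
def oddPrimeCheck (n : Int) (d : Int) : Bool :=
  if _h : d * d ≤ n then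
    if PySem.Int.mod n d == 0 then false
    else oddPrimeCheck n (d + 2)
  else true
termination_by (n + 1 - d).toNat
decreasing_by
  have hd : d ≤ n := by nlinarith [sq_nonneg (d - 1), sq_nonneg d]
  omega

def prime_sums_alt (limit : Int) : Option Int :=
  let primes : List Int :=
    2 :: (PySem.List.pyRange 3 limit 2).filter (fun n => oddPrimeCheck n 3)
  let ways : Array Int := Array.replicate (limit + 1).toNat 0
  let ways : Array Int := ways.setIfInBounds 0 1
  let ways : Array Int := primes.foldl
    (fun ways p =>
      (PySem.List.pyRange 0 (limit + 1 - p) 1).foldl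
        (fun (ways : Array Int) i =>
          ways.setIfInBounds (i + p).toNat
            (ways.getD (i + p).toNat 0 + ways.getD i.toNat 0))
        ways)
    ways
  ((PySem.List.enumerate ways.toList).find? (fun iw => iw.2 > 5000)).map (fun iw => iw.1)

-- ===== PRECONDITION & SPEC =====
-- Pre_ excludes negative limit, where Python A raises IndexError assigning the first ways entry (ways is empty there).
def Pre_prime_sums (limit : Int) : Prop := 0 ≤ limit
instance (limit : Int) : Decidable (Pre_prime_sums limit) := by unfold Pre_prime_sums; infer_instance
def pvWitness_prime_sums : Int := (10)

def Spec_prime_sums (limit : Int) (out : Option Int) : Prop := out = prime_sums_alt limit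
instance (limit : Int) (out : Option Int) : Decidable (Spec_prime_sums limit out) := by unfold Spec_prime_sums; infer_instance

-- ===== CLAIM (what is proved, stated in full; the proofs are below) =====
def Claim_equal_prime_sums : Prop := ∀ (limit : Int), Dom_prime_sums limit → Pre_prime_sums limit → Spec_prime_sums limit (prime_sums limit)

-- ===== LEMMAS AND PROOFS =====

lemma dvd_small_factor (n : Int) (h3 : 3 ≤ n) (hodd : n % 2 = 1)
    (hnp : ¬ Nat.Prime n.toNat) :
    ∃ q : Int, 3 ≤ q ∧ q % 2 = 1 ∧ q * q ≤ n ∧ q ∣ n ∧ Nat.Prime q.toNat := by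
  set m := n.toNat with hm
  have hmn : (m : Int) = n := Int.toNat_of_nonneg (by omega)
  have hq : Nat.Prime m.minFac := Nat.minFac_prime (by omega)
  have hqd : m.minFac ∣ m := Nat.minFac_dvd m
  have hqs : m.minFac * m.minFac ≤ m := by
    have := Nat.minFac_sq_le_self (n := m) (by omega) hnp
    nlinarith [this]
  have hq2 : m.minFac ≠ 2 := by
    intro h
    have h2 : (2 : Int) ∣ n := by
      rw [← hmn]
      exact_mod_cast h ▸ hqd
    omega
  have hq3 : 3 ≤ m.minFac := by have := hq.two_le; omega
  have hqodd : m.minFac % 2 = 1 := by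
    by_contra h
    have h2 : 2 ∣ m.minFac := by omega
    rcases hq.eq_one_or_self_of_dvd 2 h2 with h' | h' <;> omega
  refine ⟨(m.minFac : Int), by exact_mod_cast hq3, by omega, ?_, ?_, by simp [hq]⟩
  · calc ((m.minFac : Int) * m.minFac) = ((m.minFac * m.minFac : Nat) : Int) := by push_cast; ring
    _ ≤ (m : Int) := by exact_mod_cast hqs
    _ = n := hmn
  · rw [← hmn]; exact_mod_cast hqd

lemma prime_iff_no_odd_sqrt_divisor (n : Int) (h3 : 3 ≤ n) (hodd : n % 2 = 1) :
    Nat.Prime n.toNat ↔ ∀ e : Int, 3 ≤ e → e % 2 = 1 → e * e ≤ n → ¬ e ∣ n := by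
  constructor
  · intro hp e he3 _ hee hdvd
    have hnn : ((n.toNat : Int)) = n := Int.toNat_of_nonneg (by omega)
    have hen : ((e.toNat : Int)) = e := Int.toNat_of_nonneg (by omega)
    have hd : e.toNat ∣ n.toNat := by
      rw [← Int.natCast_dvd_natCast, hen, hnn]; exact hdvd
    rcases hp.eq_one_or_self_of_dvd e.toNat hd with h | h
    · omega
    · have hen' : e = n := by omega
      nlinarith
  · intro h
    by_contra hnp
    obtain ⟨q, hq3, hqodd, hqs, hqd, _⟩ := dvd_small_factor n h3 hodd hnp
    exact h q hq3 hqodd hqs hqd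

lemma oddPrimeCheck_iff_aux (n : Int) : ∀ (k : Nat) (d : Int), 3 ≤ d → d % 2 = 1 → (n + 1 - d).toNat ≤ k →
    ((oddPrimeCheck n d = true) ↔ ∀ e : Int, d ≤ e → e % 2 = 1 → e * e ≤ n → ¬ e ∣ n) := by
  intro k
  induction k with
  | zero =>
    intro d hd3 hdodd hk
    rw [oddPrimeCheck]
    have hdd : ¬ d * d ≤ n := by
      intro h
      have h2 : d ≤ d * d := by nlinarith
      omega
    rw [dif_neg hdd]
    constructor
    · intro _ e hde _ hee _
      exact absurd hee (by nlinarith)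
    · intro _
      rfl
  | succ k ih =>
    intro d hd3 hdodd hk
    rw [oddPrimeCheck]
    by_cases hdd : d * d ≤ n
    · simp only [hdd, dif_pos]
      by_cases hm : PySem.Int.mod n d = 0
      · have hdvd : d ∣ n := (PySem.Int.mod_eq_zero_iff_dvd n d).mp hm
        simp only [hm, beq_self_eq_true, if_true]
        constructor
        · intro h; exact absurd h (by simp)
        · intro h; exact absurd hdvd (h d le_rfl hdodd hdd)
      · have hm' : (PySem.Int.mod n d == 0) = false := by simp [hm]
        rw [hm', if_neg (show ¬(false = true) by simp)]
        have hdn : d ≤ n := by nlinarith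
        have hrec := ih (d + 2) (by omega) (by omega) (by omega)
        rw [hrec]
        constructor
        · intro h e hde he2 hee hdvd
          have : e = d ∨ d + 2 ≤ e := by omega
          rcases this with rfl | h'
          · exact hm ((PySem.Int.mod_eq_zero_iff_dvd n e).mpr hdvd)
          · exact h e h' he2 hee hdvd
        · intro h e hde he2 hee hdvd
          exact h e (by omega) he2 hee hdvd
    · rw [dif_neg hdd]
      constructor
      · intro _ e hde _ hee _
        exact absurd hee (by nlinarith)
      · intro _
        rfl

lemma oddPrimeCheck_iff_prime (n : Int) (h3 : 3 ≤ n) (hodd : n % 2 = 1) :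
    (oddPrimeCheck n 3 = true) ↔ Nat.Prime n.toNat := by
  rw [oddPrimeCheck_iff_aux n (n + 1 - 3).toNat 3 (by omega) (by omega) le_rfl]
  exact (prime_iff_no_odd_sqrt_divisor n h3 hodd).symm

def oddsUpto (m : Nat) : List Int := (List.range m).map (fun (k : Nat) => 3 + 2 * (k : Int))

lemma mem_oddsUpto {m : Nat} {p : Int} : p ∈ oddsUpto m ↔ 3 ≤ p ∧ p % 2 = 1 ∧ p < 3 + 2 * m := by
  unfold oddsUpto
  rw [List.mem_map]
  constructor
  · rintro ⟨k, hk, rfl⟩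
    have hk' := List.mem_range.mp hk
    omega
  · rintro ⟨h1, h2, h3⟩
    exact ⟨((p - 3) / 2).toNat, List.mem_range.mpr (by omega), by omega⟩

lemma allCheck_iff_prime (m : Nat) (i : Int) (hi : i = 3 + 2 * (m : Int)) :
    ((2 :: (oddsUpto m).filter (fun n => oddPrimeCheck n 3)).all
        (fun p => PySem.Int.mod i p != 0) = true) ↔ Nat.Prime i.toNat := by
  have h3 : 3 ≤ i := by omega
  have hodd : i % 2 = 1 := by omega
  rw [List.all_eq_true]
  constructor
  · intro h
    by_contra hnp
    obtain ⟨q, hq3, hqodd, hqs, hqd, hqp⟩ := dvd_small_factor i h3 hodd hnp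
    have hqlt : q < i := by nlinarith
    have hqmem : q ∈ (oddsUpto m).filter (fun n => oddPrimeCheck n 3) := by
      rw [List.mem_filter]
      refine ⟨mem_oddsUpto.mpr ⟨hq3, hqodd, by omega⟩, ?_⟩
      have hq3n : ((q.toNat : Int)) = q := Int.toNat_of_nonneg (by omega)
      exact (oddPrimeCheck_iff_prime q hq3 hqodd).mpr hqp
    have := h q (List.mem_cons_of_mem 2 hqmem)
    simp only [bne_iff_ne, ne_eq] at this
    exact this ((PySem.Int.mod_eq_zero_iff_dvd i q).mpr hqd)
  · intro hp p hpmem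
    simp only [bne_iff_ne, ne_eq]
    intro hmod
    have hdvd : p ∣ i := (PySem.Int.mod_eq_zero_iff_dvd i p).mp hmod
    rcases List.mem_cons.mp hpmem with rfl | hpm
    · omega
    · have hp3 := (List.mem_filter.mp hpm).1
      rw [mem_oddsUpto] at hp3
      have hplt : p < i := by omega
      have hnn : ((i.toNat : Int)) = i := Int.toNat_of_nonneg (by omega)
      have hpn : ((p.toNat : Int)) = p := Int.toNat_of_nonneg (by omega)
      have hd : p.toNat ∣ i.toNat := by
        rw [← Int.natCast_dvd_natCast, hpn, hnn]; exact hdvd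
      rcases hp.eq_one_or_self_of_dvd p.toNat hd with h | h <;> omega

lemma A_fold (m : Nat) :
    (oddsUpto m).foldl
      (fun primes i => if primes.all (fun p => PySem.Int.mod i p != 0) then primes ++ [i] else primes)
      [2]
    = 2 :: (oddsUpto m).filter (fun n => oddPrimeCheck n 3) := by
  induction m with
  | zero => rfl
  | succ m ih =>
    have hsplit : oddsUpto (m + 1) = oddsUpto m ++ [3 + 2 * (m : Int)] := by
      simp [oddsUpto, List.range_succ]
    rw [hsplit, List.foldl_append, List.filter_append, ih]
    have hcond : ((2 :: (oddsUpto m).filter (fun n => oddPrimeCheck n 3)).all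
        (fun p => PySem.Int.mod (3 + 2 * (m : Int)) p != 0))
        = oddPrimeCheck (3 + 2 * (m : Int)) 3 := by
      rw [Bool.eq_iff_iff]
      rw [allCheck_iff_prime m _ rfl, oddPrimeCheck_iff_prime _ (by omega) (by omega)]
    simp only [List.foldl_cons, List.foldl_nil, hcond]
    cases h : oddPrimeCheck (3 + 2 * (m : Int)) 3 <;> simp [h]

lemma pyRange_eq_oddsUpto (limit : Int) :
    PySem.List.pyRange 3 limit 2
      = oddsUpto (if (3:Int) < limit then ((limit - 3 + 2 - 1) / 2).toNat else 0) := by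
  rw [PySem.List.pyRange_of_pos 3 limit (by norm_num)]
  rfl

lemma foldl_size {α β : Type} (f : Array α → β → Array α)
    (h : ∀ w x, (f w x).size = w.size) :
    ∀ (l : List β) (w : Array α), (l.foldl f w).size = w.size := by
  intro l
  induction l with
  | nil => intro w; rfl
  | cons x t ih => intro w; rw [List.foldl_cons, ih, h]

lemma dp_inner (limit p : Int) (ways : Array Int) :
    (PySem.List.pyRange p (limit + 1) 1).foldl
      (fun (ways : Array Int) i =>
        ways.setIfInBounds i.toNat
          (ways.getD i.toNat 0 + ways.getD (i - p).toNat 0)) ways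
    = (PySem.List.pyRange 0 (limit + 1 - p) 1).foldl
      (fun (ways : Array Int) i =>
        ways.setIfInBounds (i + p).toNat
          (ways.getD (i + p).toNat 0 + ways.getD i.toNat 0)) ways := by
  rw [PySem.List.pyRange_one, PySem.List.pyRange_one]
  simp only [List.foldl_map, sub_zero]
  apply PySem.List.foldl_congr_mem
  intro acc k _
  simp only [zero_add, add_comm p, add_sub_cancel_right]

lemma scan_eq (ways : List Int) :
    (PySem.List.pyRange 0 (PySem.List.len ways) 1).find?
      (fun i => PySem.List.pyGetD ways i 0 > 5000)
    = ((PySem.List.enumerate ways).find? (fun iw => iw.2 > 5000)).map (fun iw => iw.1) := by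
  rw [PySem.List.enumerate_eq_map_pyRange ways 0, List.find?_map, Option.map_map]
  have h1 : ((fun (iw : Int × Int) => decide (5000 < iw.2)) ∘ fun j => (j, PySem.List.pyGetD ways j 0))
      = (fun i => decide (5000 < PySem.List.pyGetD ways i 0)) := rfl
  have h2 : ((fun (iw : Int × Int) => iw.1) ∘ fun j => (j, PySem.List.pyGetD ways j 0))
      = id := rfl
  rw [h1, h2, Option.map_id]
  rfl

lemma arr_getD_toList (a : Array Int) (i : Nat) (d : Int) : a.getD i d = a.toList.getD i d := by
  simp [Array.getD, List.getD]
  split <;> simp_all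

lemma find?_congr_mem {α : Type} (l : List α) (p q : α → Bool) (h : ∀ x ∈ l, p x = q x) :
    l.find? p = l.find? q := by
  induction l with
  | nil => rfl
  | cons x t ih =>
    simp only [List.find?_cons]
    rw [h x List.mem_cons_self]
    cases q x with
    | false => exact ih (fun y hy => h y (List.mem_cons_of_mem x hy))
    | true => rfl

lemma scan_eq_arr (a : Array Int) :
    (PySem.List.pyRange 0 (a.size : Int) 1).find? (fun i => a.getD i.toNat 0 > 5000)
    = ((PySem.List.enumerate a.toList).find? (fun iw => iw.2 > 5000)).map (fun iw => iw.1) := by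
  rw [← scan_eq a.toList]
  have hlen : PySem.List.len a.toList = (a.size : Int) := by
    simp [PySem.List.len_eq]
  rw [hlen]
  apply find?_congr_mem
  intro i hi
  have h0 : 0 ≤ i := ((PySem.List.mem_pyRange_one).mp hi).1
  have hcast : i = ((i.toNat : Nat) : Int) := by omega
  have hbridge : PySem.List.pyGetD a.toList i 0 = a.getD i.toNat 0 := by
    rw [arr_getD_toList]
    rw [hcast, PySem.List.pyGetD_natCast]
    simp only [Int.toNat_natCast]
  rw [hbridge]

lemma prime_sums_eq_alt (limit : Int) (hpre : 0 ≤ limit) :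
    prime_sums limit = prime_sums_alt limit := by
  unfold prime_sums prime_sums_alt
  dsimp only []
  rw [pyRange_eq_oddsUpto, A_fold]
  set M := if (3:Int) < limit then ((limit - 3 + 2 - 1) / 2).toNat else 0 with hM
  set primes := 2 :: (oddsUpto M).filter (fun n => oddPrimeCheck n 3) with hprimes
  set ways0 : Array Int := (Array.replicate (limit + 1).toNat 0).setIfInBounds 0 1 with hways0
  have hdp : primes.foldl
      (fun ways prime =>
        (PySem.List.pyRange prime (limit + 1) 1).foldl
          (fun (ways : Array Int) i =>
            ways.setIfInBounds i.toNat
              (ways.getD i.toNat 0 + ways.getD (i - prime).toNat 0))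
          ways)
      ways0
    = primes.foldl
      (fun ways p =>
        (PySem.List.pyRange 0 (limit + 1 - p) 1).foldl
          (fun (ways : Array Int) i =>
            ways.setIfInBounds (i + p).toNat
              (ways.getD (i + p).toNat 0 + ways.getD i.toNat 0))
          ways)
      ways0 := by
    apply PySem.List.foldl_congr_mem
    intro acc p _
    exact dp_inner limit p acc
  rw [hdp]
  set ways := primes.foldl
      (fun ways p =>
        (PySem.List.pyRange 0 (limit + 1 - p) 1).foldl
          (fun (ways : Array Int) i =>
            ways.setIfInBounds (i + p).toNat
              (ways.getD (i + p).toNat 0 + ways.getD i.toNat 0))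
          ways)
      ways0 with hways
  have hsize : (ways.size : Int) = limit + 1 := by
    have h1 : ways.size = ways0.size := by
      rw [hways]
      apply foldl_size
      intro w p
      apply foldl_size
      intro w' i
      exact Array.size_setIfInBounds
    have h2 : ways0.size = (limit + 1).toNat := by
      rw [hways0, Array.size_setIfInBounds, Array.size_replicate]
    rw [h1, h2]
    omega
  rw [← hsize, scan_eq_arr]

-- ===== VERDICT (by name: the statement is the Claim_ definition above) =====
theorem prime_sums_spec : Claim_equal_prime_sums := by
  intro limit _ hpre
  unfold Spec_prime_sums
  exact prime_sums_eq_alt limit hpre
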